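-- pv_equiv track=rewrite | github.com/CharlesCNorton/unified-tree-theory | tests/ntest2.py | compute_invariants_S2
-- ===== SOURCE A (Python) =====
-- def compute_invariants_S2(N):
--     """
--     Compute T[n] and S2[n] for full binary trees with n leaves.
--     S2(n) = sum_{T with n leaves} (sum of squares of leaf depths).
--     Recurrence:
--       S2(1)=0.
--       For n>=2:
--         S2(n)= sum_{i=1}^{n-1} [ S2(i)*T(n-i) + S2(n-i)*T(i)
--                   + 2*(S(i)*T(n-i) + S(n-i)*T(i)) + n*T(i)*T(n-i) ]
--     """
--     T = [0] * (N + 1)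
--     S = [0] * (N + 1)
--     S2 = [0] * (N + 1)
--
--     # Base cases
--     T[1] = 1
--     S[1] = 0
--     S2[1] = 0
--
--     if N >= 2:
--         T[2] = 1
--         S[2] = 2   # as before
--         S2[2] = 2  # unique tree with two leaves: 1^2+1^2=2
--
--     for n in range(3, N + 1):
--         T_n = 0
--         S_n = 0
--         S2_n = 0
--         for i in range(1, n):
--             j = n - i
--             prod = T[i] * T[j]
--             T_n += prod
--             S_n += S[i] * T[j] + S[j] * T[i] + n * prod
--             S2_n += (S2[i] * T[j] + S2[j] * T[i] +
--                      2 * (S[i] * T[j] + S[j] * T[i]) +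
--                      n * prod)
--         T[n] = T_n
--         S[n] = S_n
--         S2[n] = S2_n
--
--     return T, S, S2
-- ===== SOURCE B (Python) =====
-- def compute_invariants_S2(N):
--     """Same invariants, computed in three separate passes: T via the exact
--     multiplicative Catalan recurrence, then S and S2 by their convolutions."""
--     T = [0] * (N + 1)
--     S = [0] * (N + 1)
--     S2 = [0] * (N + 1)
--     T[1] = 1
--     for n in range(2, N + 1):
--         T[n] = T[n - 1] * 2 * (2 * n - 3) // n
--     for n in range(2, N + 1):
--         S[n] = sum(S[i] * T[n - i] + S[n - i] * T[i] + n * T[i] * T[n - i]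
--                    for i in range(1, n))
--     for n in range(2, N + 1):
--         S2[n] = sum(S2[i] * T[n - i] + S2[n - i] * T[i]
--                     + 2 * (S[i] * T[n - i] + S[n - i] * T[i])
--                     + n * T[i] * T[n - i]
--                     for i in range(1, n))
--     return T, S, S2
-- ===== Notes on version B (the rewrite author's own statement) =====
-- stated objective: alternative
-- what changed: A fills T, S and S2 together in one fused convolution loop; B splits the work into three passes and replaces A's T self-convolution entirely by the exact multiplicative Catalan recurrence T[n] = T[n-1]*2*(2n-3)//n, computing S and S2 in their own convolution passes over the finished arrays.
import Mathlib
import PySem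

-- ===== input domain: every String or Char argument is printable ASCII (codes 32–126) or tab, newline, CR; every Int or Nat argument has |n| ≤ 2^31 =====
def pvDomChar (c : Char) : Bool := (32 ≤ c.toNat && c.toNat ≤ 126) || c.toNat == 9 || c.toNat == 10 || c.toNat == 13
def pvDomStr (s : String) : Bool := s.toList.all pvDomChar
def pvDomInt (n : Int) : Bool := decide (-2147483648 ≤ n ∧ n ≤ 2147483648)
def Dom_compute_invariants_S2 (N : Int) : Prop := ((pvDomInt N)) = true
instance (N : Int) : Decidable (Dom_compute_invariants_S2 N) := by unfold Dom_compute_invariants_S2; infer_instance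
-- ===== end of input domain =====

-- B replaces A's fused triple convolution by three separate passes — T via the exact
-- multiplicative Catalan recurrence T[n] = T[n-1]*2*(2n-3)//n, then the S and S2
-- convolutions — an alternative decomposition with the same asymptotic cost.

-- ===== PORT A =====
-- One fused loop: for each n, a single inner loop accumulates T_n, S_n, S2_n together.
def pvStepA (st : List Int × List Int × List Int) (n : Int) :
    List Int × List Int × List Int :=
  let acc := (PySem.List.pyRange 1 n 1).foldl (fun (a : Int × Int × Int) i =>
      let j := n - i
      let prod := PySem.List.pyGetD st.1 i 0 * PySem.List.pyGetD st.1 j 0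
      (a.1 + prod,
       a.2.1 + (PySem.List.pyGetD st.2.1 i 0 * PySem.List.pyGetD st.1 j 0
                + PySem.List.pyGetD st.2.1 j 0 * PySem.List.pyGetD st.1 i 0
                + n * prod),
       a.2.2 + (PySem.List.pyGetD st.2.2 i 0 * PySem.List.pyGetD st.1 j 0
                + PySem.List.pyGetD st.2.2 j 0 * PySem.List.pyGetD st.1 i 0
                + 2 * (PySem.List.pyGetD st.2.1 i 0 * PySem.List.pyGetD st.1 j 0
                       + PySem.List.pyGetD st.2.1 j 0 * PySem.List.pyGetD st.1 i 0)
                + n * prod))) (0, 0, 0)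
  (PySem.List.pySetD st.1 n acc.1, PySem.List.pySetD st.2.1 n acc.2.1,
   PySem.List.pySetD st.2.2 n acc.2.2)

-- pySetD/pyGetD are exact here: under Pre_ (1 ≤ N) every index either side uses is in range.
def compute_invariants_S2 (N : Int) : List Int × List Int × List Int :=
  let T := PySem.List.pySetD (List.replicate (N + 1).toNat (0 : Int)) 1 1
  let S := PySem.List.pySetD (List.replicate (N + 1).toNat (0 : Int)) 1 0
  let S2 := PySem.List.pySetD (List.replicate (N + 1).toNat (0 : Int)) 1 0
  let init := if N ≥ 2 then
      (PySem.List.pySetD T 2 1, PySem.List.pySetD S 2 2, PySem.List.pySetD S2 2 2)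
    else (T, S, S2)
  (PySem.List.pyRange 3 (N + 1) 1).foldl pvStepA init

-- ===== PORT B =====
def pvStepT (T : List Int) (n : Int) : List Int :=
  PySem.List.pySetD T n
    (PySem.Int.floordiv (PySem.List.pyGetD T (n - 1) 0 * 2 * (2 * n - 3)) n)

def pvSumS (S T : List Int) (n : Int) : Int :=
  ((PySem.List.pyRange 1 n 1).map (fun i =>
    PySem.List.pyGetD S i 0 * PySem.List.pyGetD T (n - i) 0
    + PySem.List.pyGetD S (n - i) 0 * PySem.List.pyGetD T i 0
    + n * (PySem.List.pyGetD T i 0 * PySem.List.pyGetD T (n - i) 0))).sum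

def pvSumS2 (S2 S T : List Int) (n : Int) : Int :=
  ((PySem.List.pyRange 1 n 1).map (fun i =>
    PySem.List.pyGetD S2 i 0 * PySem.List.pyGetD T (n - i) 0
    + PySem.List.pyGetD S2 (n - i) 0 * PySem.List.pyGetD T i 0
    + 2 * (PySem.List.pyGetD S i 0 * PySem.List.pyGetD T (n - i) 0
           + PySem.List.pyGetD S (n - i) 0 * PySem.List.pyGetD T i 0)
    + n * (PySem.List.pyGetD T i 0 * PySem.List.pyGetD T (n - i) 0))).sum

def compute_invariants_S2_alt (N : Int) : List Int × List Int × List Int :=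
  let T := (PySem.List.pyRange 2 (N + 1) 1).foldl pvStepT
    (PySem.List.pySetD (List.replicate (N + 1).toNat (0 : Int)) 1 1)
  let S := (PySem.List.pyRange 2 (N + 1) 1).foldl
    (fun S n => PySem.List.pySetD S n (pvSumS S T n)) (List.replicate (N + 1).toNat (0 : Int))
  let S2 := (PySem.List.pyRange 2 (N + 1) 1).foldl
    (fun S2 n => PySem.List.pySetD S2 n (pvSumS2 S2 S T n)) (List.replicate (N + 1).toNat (0 : Int))
  (T, S, S2)

-- ===== PRECONDITION & SPEC =====
-- Python A raises IndexError (at the assignment T[1] = 1) exactly when N < 1.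
def Pre_compute_invariants_S2 (N : Int) : Prop := 1 ≤ N
instance (N : Int) : Decidable (Pre_compute_invariants_S2 N) := by
  unfold Pre_compute_invariants_S2; infer_instance
def pvWitness_compute_invariants_S2 : Int := 3

def Spec_compute_invariants_S2 (N : Int) (out : List Int × List Int × List Int) : Prop :=
  out = compute_invariants_S2_alt N
instance (N : Int) (out : List Int × List Int × List Int) :
    Decidable (Spec_compute_invariants_S2 N out) := by
  unfold Spec_compute_invariants_S2; infer_instance

-- ===== CLAIM (what is proved, stated in full; the proofs are below) =====
def Claim_equal_compute_invariants_S2 : Prop :=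
  ∀ (N : Int), Dom_compute_invariants_S2 N → Pre_compute_invariants_S2 N →
    Spec_compute_invariants_S2 N (compute_invariants_S2 N)

-- ===== LEMMAS AND PROOFS =====

-- Ideal sequences: pvT n = catalan (n-1) counts full binary trees with n leaves,
-- pvS n is the total leaf depth, pvS2 n the total sum of squares of leaf depths.
def pvT (k : ℕ) : ℤ := if k = 0 then 0 else (catalan (k - 1) : ℤ)

def pvSAux : ℕ → ℕ → ℤ
  | 0, _ => 0
  | f + 1, n => if n < 2 then 0 else
      ∑ i ∈ Finset.Ico 1 n,
        (pvSAux f i * pvT (n - i) + pvSAux f (n - i) * pvT i + (n : ℤ) * (pvT i * pvT (n - i)))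

def pvS (n : ℕ) : ℤ := pvSAux n n

def pvS2Aux : ℕ → ℕ → ℤ
  | 0, _ => 0
  | f + 1, n => if n < 2 then 0 else
      ∑ i ∈ Finset.Ico 1 n,
        (pvS2Aux f i * pvT (n - i) + pvS2Aux f (n - i) * pvT i
         + 2 * (pvS i * pvT (n - i) + pvS (n - i) * pvT i)
         + (n : ℤ) * (pvT i * pvT (n - i)))

def pvS2 (n : ℕ) : ℤ := pvS2Aux n n

lemma pvSAux_small (f n : ℕ) (h : n < 2) : pvSAux f n = 0 := by
  cases f <;> simp [pvSAux, h]

lemma pvS2Aux_small (f n : ℕ) (h : n < 2) : pvS2Aux f n = 0 := by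
  cases f <;> simp [pvS2Aux, h]

lemma pvSAux_congr (n : ℕ) : ∀ f g, n ≤ f → n ≤ g → pvSAux f n = pvSAux g n := by
  induction n using Nat.strong_induction_on with
  | _ n ih =>
    intro f g hf hg
    by_cases h2 : n < 2
    · rw [pvSAux_small f n h2, pvSAux_small g n h2]
    · obtain ⟨f, rfl⟩ : ∃ f', f = f' + 1 := ⟨f - 1, by omega⟩
      obtain ⟨g, rfl⟩ : ∃ g', g = g' + 1 := ⟨g - 1, by omega⟩
      simp only [pvSAux, if_neg h2]
      refine Finset.sum_congr rfl ?_
      intro i hi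
      obtain ⟨h1, hlt⟩ := Finset.mem_Ico.mp hi
      rw [ih i hlt f g (by omega) (by omega),
          ih (n - i) (by omega) f g (by omega) (by omega)]

lemma pvS2Aux_congr (n : ℕ) : ∀ f g, n ≤ f → n ≤ g → pvS2Aux f n = pvS2Aux g n := by
  induction n using Nat.strong_induction_on with
  | _ n ih =>
    intro f g hf hg
    by_cases h2 : n < 2
    · rw [pvS2Aux_small f n h2, pvS2Aux_small g n h2]
    · obtain ⟨f, rfl⟩ : ∃ f', f = f' + 1 := ⟨f - 1, by omega⟩
      obtain ⟨g, rfl⟩ : ∃ g', g = g' + 1 := ⟨g - 1, by omega⟩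
      simp only [pvS2Aux, if_neg h2]
      refine Finset.sum_congr rfl ?_
      intro i hi
      obtain ⟨h1, hlt⟩ := Finset.mem_Ico.mp hi
      rw [ih i hlt f g (by omega) (by omega),
          ih (n - i) (by omega) f g (by omega) (by omega)]

lemma pvS_eq (n : ℕ) (h : 2 ≤ n) :
    pvS n = ∑ i ∈ Finset.Ico 1 n,
      (pvS i * pvT (n - i) + pvS (n - i) * pvT i + (n : ℤ) * (pvT i * pvT (n - i))) := by
  obtain ⟨m, rfl⟩ : ∃ m, n = m + 1 := ⟨n - 1, by omega⟩
  show pvSAux (m + 1) (m + 1) = _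
  simp only [pvSAux, if_neg (by omega : ¬ m + 1 < 2)]
  refine Finset.sum_congr rfl ?_
  intro i hi
  obtain ⟨h1, hlt⟩ := Finset.mem_Ico.mp hi
  rw [pvSAux_congr i m i (by omega) le_rfl,
      pvSAux_congr (m + 1 - i) m (m + 1 - i) (by omega) le_rfl]
  rfl

lemma pvS2_eq (n : ℕ) (h : 2 ≤ n) :
    pvS2 n = ∑ i ∈ Finset.Ico 1 n,
      (pvS2 i * pvT (n - i) + pvS2 (n - i) * pvT i
       + 2 * (pvS i * pvT (n - i) + pvS (n - i) * pvT i)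
       + (n : ℤ) * (pvT i * pvT (n - i))) := by
  obtain ⟨m, rfl⟩ : ∃ m, n = m + 1 := ⟨n - 1, by omega⟩
  show pvS2Aux (m + 1) (m + 1) = _
  simp only [pvS2Aux, if_neg (by omega : ¬ m + 1 < 2)]
  refine Finset.sum_congr rfl ?_
  intro i hi
  obtain ⟨h1, hlt⟩ := Finset.mem_Ico.mp hi
  rw [pvS2Aux_congr i m i (by omega) le_rfl,
      pvS2Aux_congr (m + 1 - i) m (m + 1 - i) (by omega) le_rfl]
  rfl

-- Catalan convolution: pvT's self-convolution reproduces pvT (A's T recurrence).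
lemma pvT_conv (n : ℕ) (h : 2 ≤ n) :
    ∑ i ∈ Finset.Ico 1 n, pvT i * pvT (n - i) = pvT n := by
  rw [Finset.sum_Ico_eq_sum_range]
  have hc : ∀ k ∈ Finset.range (n - 1),
      pvT (1 + k) * pvT (n - (1 + k)) = ((catalan k : ℤ) * (catalan (n - 2 - k) : ℤ)) := by
    intro k hk
    have hk' := Finset.mem_range.mp hk
    have e1 : pvT (1 + k) = (catalan k : ℤ) := by
      simp only [pvT, if_neg (by omega : ¬ 1 + k = 0)]
      congr 2
      omega
    have e2 : pvT (n - (1 + k)) = (catalan (n - 2 - k) : ℤ) := by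
      simp only [pvT, if_neg (by omega : ¬ n - (1 + k) = 0)]
      congr 2
      omega
    rw [e1, e2]
  rw [Finset.sum_congr rfl hc]
  have e3 : pvT n = (catalan (n - 2 + 1) : ℤ) := by
    simp only [pvT, if_neg (by omega : ¬ n = 0)]
    congr 2
    omega
  rw [e3, catalan_succ (n - 2),
      Fin.sum_univ_eq_sum_range (fun i => catalan i * catalan (n - 2 - i)) (n - 2 + 1),
      (by omega : n - 2 + 1 = n - 1)]
  push_cast
  rfl

-- Multiplicative Catalan step: n * pvT n = 2 * (2n - 3) * pvT (n-1)  (B's T recurrence).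
lemma pvT_mult (n : ℕ) (h : 2 ≤ n) :
    PySem.Int.floordiv (pvT (n - 1) * 2 * (2 * (n : ℤ) - 3)) (n : ℤ) = pvT n := by
  have key : pvT (n - 1) * 2 * (2 * (n : ℤ) - 3) = pvT n * (n : ℤ) := by
    obtain ⟨m, rfl⟩ : ∃ m, n = m + 2 := ⟨n - 2, by omega⟩
    have a1 := succ_mul_catalan_eq_centralBinom (m + 1)
    have b1 := Nat.succ_mul_centralBinom_succ m
    have c1 := succ_mul_catalan_eq_centralBinom m
    have a1' : (m + 2) * catalan (m + 1) = Nat.centralBinom (m + 1) := a1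
    have key_nat : (m + 2) * catalan (m + 1) = 2 * (2 * m + 1) * catalan m := by
      have h2 : (m + 1) * ((m + 2) * catalan (m + 1))
          = (m + 1) * (2 * (2 * m + 1) * catalan m) := by
        calc (m + 1) * ((m + 2) * catalan (m + 1))
            = (m + 1) * Nat.centralBinom (m + 1) := by rw [a1']
          _ = 2 * (2 * m + 1) * Nat.centralBinom m := b1
          _ = 2 * (2 * m + 1) * ((m + 1) * catalan m) := by rw [c1]
          _ = (m + 1) * (2 * (2 * m + 1) * catalan m) := by ring
      exact Nat.eq_of_mul_eq_mul_left (by omega) h2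
    have e1 : pvT (m + 2 - 1) = (catalan m : ℤ) := rfl
    have e2 : pvT (m + 2) = (catalan (m + 1) : ℤ) := rfl
    have kz : ((m : ℤ) + 2) * (catalan (m + 1) : ℤ)
        = 2 * (2 * (m : ℤ) + 1) * (catalan m : ℤ) := by exact_mod_cast key_nat
    rw [e1, e2]
    push_cast
    linarith [kz]
  have hn0 : (0 : ℤ) < (n : ℤ) := by exact_mod_cast (by omega : 0 < n)
  rw [key, PySem.Int.floordiv_eq_ediv_of_pos hn0, Int.mul_ediv_cancel _ (by omega)]

-- Array invariant: the first u entries of xs follow the sequence f; total length len.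
def pvOK (len u : ℕ) (xs : List Int) (f : ℕ → ℤ) : Prop :=
  xs.length = len ∧ ∀ k, k < u → xs.getD k 0 = f k

lemma pvGetD_set_self (xs : List Int) (k : ℕ) (h : k < xs.length) (v : Int) :
    (xs.set k v).getD k 0 = v := by
  simp [List.getD, h]

lemma pvGetD_set_ne (xs : List Int) (k j : ℕ) (h : k ≠ j) (v : Int) :
    (xs.set k v).getD j 0 = xs.getD j 0 := by
  simp [List.getD, List.getElem?_set_ne h]

lemma pvGetD_replicate (len k : ℕ) : (List.replicate len (0 : Int)).getD k 0 = 0 := by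
  simp [List.getD, List.getElem?_replicate]
  split <;> simp

lemma pvOK_mono {len u v : ℕ} {xs : List Int} {f : ℕ → ℤ} (h : pvOK len v xs f)
    (huv : u ≤ v) : pvOK len u xs f :=
  ⟨h.1, fun k hk => h.2 k (lt_of_lt_of_le hk huv)⟩

lemma pvOK_set {len u : ℕ} {xs : List Int} {f : ℕ → ℤ} {v : ℤ} (h : pvOK len u xs f)
    (hu : u < len) (hv : v = f u) : pvOK len (u + 1) (xs.set u v) f := by
  refine ⟨by simp [h.1], ?_⟩
  intro k hk
  by_cases hek : k = u
  · subst hek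
    rw [pvGetD_set_self xs k (h.1 ▸ hu) v]
    exact hv
  · rw [pvGetD_set_ne xs u k (fun hh => hek hh.symm) v]
    exact h.2 k (by omega)

lemma pvOK_ext {len : ℕ} {X Y : List Int} {f : ℕ → ℤ} (hX : pvOK len len X f)
    (hY : pvOK len len Y f) : X = Y := by
  apply List.ext_getElem (by rw [hX.1, hY.1])
  intro k h1 h2
  have e1 : X.getD k 0 = X[k] := List.getD_eq_getElem X 0 h1
  have e2 : Y.getD k 0 = Y[k] := List.getD_eq_getElem Y 0 h2
  rw [← e1, ← e2, hX.2 k (hX.1 ▸ h1), hY.2 k (hY.1 ▸ h2)]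

-- sum over Python's range(1, n) as a Finset.Ico sum
lemma map_pyRange_one_sum (u : ℕ) (f : Int → ℤ) :
    ((PySem.List.pyRange 1 (u : Int) 1).map f).sum = ∑ k ∈ Finset.Ico 1 u, f (k : Int) := by
  rw [PySem.List.pyRange_one, List.map_map,
      (by omega : ((u : Int) - 1).toNat = u - 1)]
  have e1 : ((List.range (u - 1)).map (f ∘ fun k : ℕ => 1 + (k : Int))).sum
      = ∑ k ∈ Finset.range (u - 1), f (1 + (k : Int)) := rfl
  rw [e1, Finset.sum_Ico_eq_sum_range (fun i : ℕ => f (i : Int)) 1 u]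
  refine Finset.sum_congr rfl ?_
  intro k _
  congr 1

lemma pvSumT_raw (len n : ℕ) (hn : 2 ≤ n) (_hnl : n ≤ len) (T : List Int)
    (hT : pvOK len n T pvT) :
    ((PySem.List.pyRange 1 ((n : ℕ) : Int) 1).map (fun i =>
      PySem.List.pyGetD T i 0 * PySem.List.pyGetD T (((n : ℕ) : Int) - i) 0)).sum = pvT n := by
  rw [map_pyRange_one_sum, ← pvT_conv n hn]
  refine Finset.sum_congr rfl ?_
  intro i hi
  obtain ⟨h1, hlt⟩ := Finset.mem_Ico.mp hi
  rw [(by omega : ((n : ℕ) : Int) - ((i : ℕ) : Int) = ((n - i : ℕ) : Int))]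
  simp only [PySem.List.pyGetD_natCast]
  rw [hT.2 i (by omega), hT.2 (n - i) (by omega)]

lemma pvSumS_raw (len n : ℕ) (hn : 2 ≤ n) (_hnl : n ≤ len) (S T : List Int)
    (hS : pvOK len n S pvS) (hT : pvOK len n T pvT) :
    pvSumS S T ((n : ℕ) : Int) = pvS n := by
  unfold pvSumS
  rw [map_pyRange_one_sum, pvS_eq n hn]
  refine Finset.sum_congr rfl ?_
  intro i hi
  obtain ⟨h1, hlt⟩ := Finset.mem_Ico.mp hi
  rw [(by omega : ((n : ℕ) : Int) - ((i : ℕ) : Int) = ((n - i : ℕ) : Int))]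
  simp only [PySem.List.pyGetD_natCast]
  rw [hS.2 i (by omega), hS.2 (n - i) (by omega), hT.2 i (by omega), hT.2 (n - i) (by omega)]

lemma pvSumS2_raw (len n : ℕ) (hn : 2 ≤ n) (_hnl : n ≤ len) (S2 S T : List Int)
    (hS2 : pvOK len n S2 pvS2) (hS : pvOK len n S pvS) (hT : pvOK len n T pvT) :
    pvSumS2 S2 S T ((n : ℕ) : Int) = pvS2 n := by
  unfold pvSumS2
  rw [map_pyRange_one_sum, pvS2_eq n hn]
  refine Finset.sum_congr rfl ?_
  intro i hi
  obtain ⟨h1, hlt⟩ := Finset.mem_Ico.mp hi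
  rw [(by omega : ((n : ℕ) : Int) - ((i : ℕ) : Int) = ((n - i : ℕ) : Int))]
  simp only [PySem.List.pyGetD_natCast]
  rw [hS2.2 i (by omega), hS2.2 (n - i) (by omega), hS.2 i (by omega), hS.2 (n - i) (by omega),
      hT.2 i (by omega), hT.2 (n - i) (by omega)]

lemma pvT_one : pvT 1 = 1 := by simp [pvT]

lemma pvT_two : pvT 2 = 1 := by simp [pvT, catalan_one]

lemma pvS_one : pvS 1 = 0 := pvSAux_small 1 1 (by omega)

lemma pvS2_one : pvS2 1 = 0 := pvS2Aux_small 1 1 (by omega)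

lemma pvS_two : pvS 2 = 2 := by
  rw [pvS_eq 2 (le_refl 2), (by decide : Finset.Ico 1 2 = {1}), Finset.sum_singleton]
  rw [pvS_one, pvT_one]
  norm_num

lemma pvS2_two : pvS2 2 = 2 := by
  rw [pvS2_eq 2 (le_refl 2), (by decide : Finset.Ico 1 2 = {1}), Finset.sum_singleton]
  rw [pvS2_one, pvS_one, pvT_one]
  norm_num

-- B's T pass fills T with pvT.
lemma pvTB (len : ℕ) (hlen : 2 ≤ len) :
    ∀ u, 2 ≤ u → u ≤ len →
      pvOK len u ((PySem.List.pyRange 2 ((u : ℕ) : Int) 1).foldl pvStepT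
        (PySem.List.pySetD (List.replicate len (0 : Int)) 1 1)) pvT := by
  intro u hu
  induction u, hu using Nat.le_induction with
  | base =>
    intro _
    rw [(by norm_num : ((2 : ℕ) : Int) = 2), PySem.List.pyRange_one_eq_nil (by norm_num),
        List.foldl_nil, PySem.List.pySetD_of_nonneg _ _ (by norm_num),
        (by norm_num : ((1 : Int)).toNat = 1)]
    refine ⟨by simp, ?_⟩
    intro k hk
    interval_cases k
    · rw [pvGetD_set_ne _ 1 0 (by omega), pvGetD_replicate]
      simp [pvT]
    · rw [pvGetD_set_self _ 1 (by simpa using hlen)]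
      simp [pvT]
  | succ n hn ih =>
    intro hle
    have hprev := ih (by omega)
    have hr : PySem.List.pyRange 2 ((n + 1 : ℕ) : Int) 1
        = PySem.List.pyRange 2 ((n : ℕ) : Int) 1 ++ [((n : ℕ) : Int)] := by
      push_cast
      exact PySem.List.pyRange_one_succ_right (by exact_mod_cast hn)
    rw [hr, List.foldl_append, List.foldl_cons, List.foldl_nil]
    set TP := (PySem.List.pyRange 2 ((n : ℕ) : Int) 1).foldl pvStepT
      (PySem.List.pySetD (List.replicate len (0 : Int)) 1 1) with hTP
    unfold pvStepT
    rw [(by omega : ((n : ℕ) : Int) - 1 = ((n - 1 : ℕ) : Int)), PySem.List.pySetD_natCast,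
        PySem.List.pyGetD_natCast, hprev.2 (n - 1) (by omega), pvT_mult n hn]
    exact pvOK_set hprev (by omega) rfl

-- B's S pass fills S with pvS.
lemma pvSB (len : ℕ) (_hlen : 2 ≤ len) (Tf : List Int) (hT : pvOK len len Tf pvT) :
    ∀ u, 2 ≤ u → u ≤ len →
      pvOK len u ((PySem.List.pyRange 2 ((u : ℕ) : Int) 1).foldl
        (fun S n => PySem.List.pySetD S n (pvSumS S Tf n))
        (List.replicate len (0 : Int))) pvS := by
  intro u hu
  induction u, hu using Nat.le_induction with
  | base =>
    intro _
    rw [(by norm_num : ((2 : ℕ) : Int) = 2), PySem.List.pyRange_one_eq_nil (by norm_num),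
        List.foldl_nil]
    refine ⟨by simp, ?_⟩
    intro k hk
    rw [pvGetD_replicate]
    interval_cases k <;> rfl
  | succ n hn ih =>
    intro hle
    have hprev := ih (by omega)
    have hr : PySem.List.pyRange 2 ((n + 1 : ℕ) : Int) 1
        = PySem.List.pyRange 2 ((n : ℕ) : Int) 1 ++ [((n : ℕ) : Int)] := by
      push_cast
      exact PySem.List.pyRange_one_succ_right (by exact_mod_cast hn)
    rw [hr, List.foldl_append, List.foldl_cons, List.foldl_nil]
    rw [pvSumS_raw len n hn (by omega) _ Tf hprev (pvOK_mono hT (by omega)),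
        PySem.List.pySetD_natCast]
    exact pvOK_set hprev (by omega) rfl

-- B's S2 pass fills S2 with pvS2.
lemma pvS2B (len : ℕ) (_hlen : 2 ≤ len) (Tf Sf : List Int) (hT : pvOK len len Tf pvT)
    (hS : pvOK len len Sf pvS) :
    ∀ u, 2 ≤ u → u ≤ len →
      pvOK len u ((PySem.List.pyRange 2 ((u : ℕ) : Int) 1).foldl
        (fun S2 n => PySem.List.pySetD S2 n (pvSumS2 S2 Sf Tf n))
        (List.replicate len (0 : Int))) pvS2 := by
  intro u hu
  induction u, hu using Nat.le_induction with
  | base =>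
    intro _
    rw [(by norm_num : ((2 : ℕ) : Int) = 2), PySem.List.pyRange_one_eq_nil (by norm_num),
        List.foldl_nil]
    refine ⟨by simp, ?_⟩
    intro k hk
    rw [pvGetD_replicate]
    interval_cases k <;> rfl
  | succ n hn ih =>
    intro hle
    have hprev := ih (by omega)
    have hr : PySem.List.pyRange 2 ((n + 1 : ℕ) : Int) 1
        = PySem.List.pyRange 2 ((n : ℕ) : Int) 1 ++ [((n : ℕ) : Int)] := by
      push_cast
      exact PySem.List.pyRange_one_succ_right (by exact_mod_cast hn)
    rw [hr, List.foldl_append, List.foldl_cons, List.foldl_nil]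
    rw [pvSumS2_raw len n hn (by omega) _ Sf Tf hprev (pvOK_mono hS (by omega))
          (pvOK_mono hT (by omega)),
        PySem.List.pySetD_natCast]
    exact pvOK_set hprev (by omega) rfl

def pvOK3 (len u : ℕ) (st : List Int × List Int × List Int) : Prop :=
  pvOK len u st.1 pvT ∧ pvOK len u st.2.1 pvS ∧ pvOK len u st.2.2 pvS2

-- a fold with three independent accumulators is three independent sums
lemma foldl_triple (P Q R : Int → Int) (l : List Int) (a b c : Int) :
    l.foldl (fun s i => (s.1 + P i, s.2.1 + Q i, s.2.2 + R i)) (a, b, c)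
      = (a + (l.map P).sum, b + (l.map Q).sum, c + (l.map R).sum) := by
  rw [PySem.List.foldl_prod_mk (f := fun x i => x + P i)
        (g := fun (p : Int × Int) i => (p.1 + Q i, p.2 + R i)),
      PySem.List.foldl_prod_mk (f := fun x i => x + Q i) (g := fun x i => x + R i),
      PySem.List.foldl_add, PySem.List.foldl_add, PySem.List.foldl_add]

lemma pvStepA_inv (len n : ℕ) (st : List Int × List Int × List Int) (hn : 2 ≤ n)
    (hnl : n < len) (h : pvOK3 len n st) : pvOK3 len (n + 1) (pvStepA st ((n : ℕ) : Int)) := by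
  obtain ⟨hT, hS, hS2⟩ := h
  simp only [pvStepA]
  rw [foldl_triple]
  simp only [zero_add]
  rw [pvSumT_raw len n hn (by omega) st.1 hT]
  rw [show ((PySem.List.pyRange 1 ((n : ℕ) : Int) 1).map (fun i =>
        PySem.List.pyGetD st.2.1 i 0 * PySem.List.pyGetD st.1 (((n : ℕ) : Int) - i) 0
        + PySem.List.pyGetD st.2.1 (((n : ℕ) : Int) - i) 0 * PySem.List.pyGetD st.1 i 0
        + ((n : ℕ) : Int) * (PySem.List.pyGetD st.1 i 0
            * PySem.List.pyGetD st.1 (((n : ℕ) : Int) - i) 0))).sum = pvS n from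
    pvSumS_raw len n hn (by omega) st.2.1 st.1 hS hT]
  rw [show ((PySem.List.pyRange 1 ((n : ℕ) : Int) 1).map (fun i =>
        PySem.List.pyGetD st.2.2 i 0 * PySem.List.pyGetD st.1 (((n : ℕ) : Int) - i) 0
        + PySem.List.pyGetD st.2.2 (((n : ℕ) : Int) - i) 0 * PySem.List.pyGetD st.1 i 0
        + 2 * (PySem.List.pyGetD st.2.1 i 0 * PySem.List.pyGetD st.1 (((n : ℕ) : Int) - i) 0
               + PySem.List.pyGetD st.2.1 (((n : ℕ) : Int) - i) 0 * PySem.List.pyGetD st.1 i 0)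
        + ((n : ℕ) : Int) * (PySem.List.pyGetD st.1 i 0
            * PySem.List.pyGetD st.1 (((n : ℕ) : Int) - i) 0))).sum = pvS2 n from
    pvSumS2_raw len n hn (by omega) st.2.2 st.2.1 st.1 hS2 hS hT]
  rw [PySem.List.pySetD_natCast, PySem.List.pySetD_natCast, PySem.List.pySetD_natCast]
  exact ⟨pvOK_set hT hnl rfl, pvOK_set hS hnl rfl, pvOK_set hS2 hnl rfl⟩

lemma pvAfold (len : ℕ) (init : List Int × List Int × List Int) (h : pvOK3 len 3 init) :
    ∀ u, 3 ≤ u → u ≤ len →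
      pvOK3 len u ((PySem.List.pyRange 3 ((u : ℕ) : Int) 1).foldl pvStepA init) := by
  intro u hu
  induction u, hu using Nat.le_induction with
  | base =>
    intro _
    rw [(by norm_num : ((3 : ℕ) : Int) = 3), PySem.List.pyRange_one_eq_nil (by norm_num),
        List.foldl_nil]
    exact h
  | succ n hn ih =>
    intro hle
    have hr : PySem.List.pyRange 3 ((n + 1 : ℕ) : Int) 1
        = PySem.List.pyRange 3 ((n : ℕ) : Int) 1 ++ [((n : ℕ) : Int)] := by
      push_cast
      exact PySem.List.pyRange_one_succ_right (by exact_mod_cast hn)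
    rw [hr, List.foldl_append, List.foldl_cons, List.foldl_nil]
    exact pvStepA_inv len n _ (by omega) (by omega) (ih (by omega))

lemma pvMain2 (N : Int) (h2 : 2 ≤ N) :
    compute_invariants_S2 N = compute_invariants_S2_alt N := by
  obtain ⟨len, hc, hl3⟩ : ∃ len : ℕ, (N : Int) + 1 = ((len : ℕ) : Int) ∧ 3 ≤ len :=
    ⟨(N + 1).toNat, by omega, by omega⟩
  simp only [compute_invariants_S2, compute_invariants_S2_alt]
  rw [if_pos (show N ≥ 2 from h2), hc, Int.toNat_natCast]
  have hT := pvTB len (by omega) len (by omega) le_rfl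
  have hS := pvSB len (by omega) _ hT len (by omega) le_rfl
  have hS2 := pvS2B len (by omega) _ _ hT hS len (by omega) le_rfl
  have hinit : pvOK3 len 3
      (PySem.List.pySetD (PySem.List.pySetD (List.replicate len (0 : Int)) 1 1) 2 1,
       PySem.List.pySetD (PySem.List.pySetD (List.replicate len (0 : Int)) 1 0) 2 2,
       PySem.List.pySetD (PySem.List.pySetD (List.replicate len (0 : Int)) 1 0) 2 2) := by
    have c1 : ((1 : Int)).toNat = 1 := by norm_num
    have c2 : ((2 : Int)).toNat = 2 := rfl
    simp only [PySem.List.pySetD_of_nonneg _ _ (by norm_num : (0:Int) ≤ 1),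
      PySem.List.pySetD_of_nonneg _ _ (by norm_num : (0:Int) ≤ 2), c1, c2]
    refine ⟨⟨by simp, ?_⟩, ⟨by simp, ?_⟩, ⟨by simp, ?_⟩⟩ <;>
      · intro k hk
        interval_cases k
        · rw [pvGetD_set_ne _ 2 0 (by omega), pvGetD_set_ne _ 1 0 (by omega), pvGetD_replicate]
          rfl
        · rw [pvGetD_set_ne _ 2 1 (by omega), pvGetD_set_self _ 1 (by simp; omega)]
          first
            | exact pvT_one.symm
            | rfl
        · rw [pvGetD_set_self _ 2 (by simp; omega)]
          first
            | (show (1:ℤ) = pvT 2; rw [pvT_two])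
            | (show (2:ℤ) = pvS 2; rw [pvS_two])
            | (show (2:ℤ) = pvS2 2; rw [pvS2_two])
  have hA := pvAfold len _ hinit len (by omega) le_rfl
  refine Prod.ext ?_ (Prod.ext ?_ ?_)
  · exact pvOK_ext hA.1 hT
  · exact pvOK_ext hA.2.1 hS
  · exact pvOK_ext hA.2.2 hS2

-- ===== VERDICT (by name: the statement is the Claim_ definition above) =====
theorem compute_invariants_S2_spec : Claim_equal_compute_invariants_S2 := by
  intro N _ hpre
  unfold Spec_compute_invariants_S2
  by_cases h2 : 2 ≤ N
  · exact pvMain2 N h2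
  · have h1 : N = 1 := by
      unfold Pre_compute_invariants_S2 at hpre
      omega
    subst h1
    decide
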